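-- pv_equiv track=rewrite | github.com/senicko/wdi-kolos-2 | 117.py | is_fib
-- ===== SOURCE A (Python) =====
-- def is_fib(x, y):
--     a = 1
--     b = 1
--
--     while a <= x:
--         if a == x and b == y:
--             return True
--         a, b = b, a + b
--
--     return False
-- ===== SOURCE B (Python) =====
-- def is_fib(x, y):
--     d = y * y - x * y - x * x
--     return x >= 1 and y >= 1 and (d == 1 or d == -1)
-- ===== Notes on version B (the rewrite author's own statement) =====
-- stated objective: simpler
-- what changed: Replaced the iterative Fibonacci scan with the closed-form test |y^2 - x*y - x^2| = 1 (with x >= 1 and y >= 1), which characterizes consecutive Fibonacci pairs.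
import Mathlib
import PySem

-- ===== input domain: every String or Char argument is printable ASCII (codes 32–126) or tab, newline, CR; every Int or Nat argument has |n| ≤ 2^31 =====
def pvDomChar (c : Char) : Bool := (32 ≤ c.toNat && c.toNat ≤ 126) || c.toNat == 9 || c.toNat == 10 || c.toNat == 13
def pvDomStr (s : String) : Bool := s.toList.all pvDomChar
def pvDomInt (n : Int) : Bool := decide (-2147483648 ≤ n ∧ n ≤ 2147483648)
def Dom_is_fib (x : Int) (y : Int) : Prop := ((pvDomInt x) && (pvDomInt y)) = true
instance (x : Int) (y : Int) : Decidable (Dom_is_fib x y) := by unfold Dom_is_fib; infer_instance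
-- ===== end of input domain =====

-- B replaces A's iterative Fibonacci scan with the closed-form identity test
-- |y^2 - x*y - x^2| = 1 (with x ≥ 1, y ≥ 1), which characterizes consecutive Fibonacci pairs.

-- ===== PORT A =====
-- A's while loop, with fuel only to make it total; fuel x.toNat + 2 is proved
-- sufficient (the loop runs while a ≤ x and a grows at least linearly).
def is_fib_loop : Nat → Int → Int → Int → Int → Bool
  | 0, _, _, _, _ => false
  | fuel + 1, x, y, a, b =>
    if a ≤ x then
      if a = x ∧ b = y then true
      else is_fib_loop fuel x y b (a + b)
    else false

def is_fib (x : Int) (y : Int) : Bool := is_fib_loop (x.toNat + 2) x y 1 1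

-- ===== PORT B =====
def is_fib_alt (x : Int) (y : Int) : Bool :=
  decide (1 ≤ x) && decide (1 ≤ y) &&
    (decide (y * y - x * y - x * x = 1) || decide (y * y - x * y - x * x = -1))

-- ===== PRECONDITION & SPEC =====
def Spec_is_fib (x : Int) (y : Int) (out : Bool) : Prop := out = is_fib_alt x y
instance (x : Int) (y : Int) (out : Bool) : Decidable (Spec_is_fib x y out) := by unfold Spec_is_fib; infer_instance

-- ===== CLAIM (what is proved, stated in full; the proofs are below) =====
def Claim_equal_is_fib : Prop := ∀ (x : Int) (y : Int), Dom_is_fib x y → Spec_is_fib x y (is_fib x y)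

-- ===== LEMMAS AND PROOFS =====

-- the successive (a, b) pairs of A's loop, started at (1, 1)
def fibPair : Nat → Int × Int
  | 0 => (1, 1)
  | n + 1 => ((fibPair n).2, (fibPair n).1 + (fibPair n).2)

lemma fibPair_inv (n : Nat) : 1 ≤ (fibPair n).1 ∧ (fibPair n).1 ≤ (fibPair n).2 := by
  induction n with
  | zero => exact ⟨le_refl 1, le_refl 1⟩
  | succ n ih => simp only [fibPair]; omega

lemma fibPair_snd_grow (n : Nat) : (n : Int) + 1 ≤ (fibPair n).2 := by
  induction n with
  | zero => simp [fibPair]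
  | succ n ih =>
    have h := fibPair_inv n
    simp only [fibPair]; push_cast; omega

lemma fibPair_fst_grow (n : Nat) : (n : Int) ≤ (fibPair n).1 := by
  cases n with
  | zero => simp [fibPair]
  | succ n =>
    have h := fibPair_snd_grow n
    simp only [fibPair]; push_cast at h ⊢; omega

-- the loop step iterated d times from an arbitrary pair
def iterD : Nat → Int × Int → Int × Int
  | 0, p => p
  | d + 1, p => iterD d (p.2, p.1 + p.2)

lemma iterD_fibPair (n : Nat) : iterD n (1, 1) = fibPair n := by
  have key : ∀ d k, iterD d (fibPair k) = fibPair (k + d) := by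
    intro d
    induction d with
    | zero => intro k; simp [iterD]
    | succ d ih =>
      intro k
      have : iterD (d + 1) (fibPair k) = iterD d (fibPair (k + 1)) := by
        simp [iterD, fibPair]
      rw [this, ih (k + 1)]
      congr 1
      omega
  have := key n 0
  simpa [fibPair] using this

lemma iterD_fst_ge (d : Nat) : ∀ a b : Int, 1 ≤ a → a ≤ b →
    a ≤ (iterD d (a, b)).1 ∧ 1 ≤ (iterD d (a, b)).1 := by
  induction d with
  | zero => intro a b ha hab; simp [iterD]; omega
  | succ d ih =>
    intro a b ha hab
    have h := ih b (a + b) (by omega) (by omega)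
    simp only [iterD] at *
    omega

-- if (x, y) is reached from (a, b) in d steps, the loop from (a, b) with fuel > d returns true
lemma loop_hits (d : Nat) : ∀ (a b x y : Int) (fuel : Nat), 1 ≤ a → a ≤ b →
    iterD d (a, b) = (x, y) → d < fuel → is_fib_loop fuel x y a b = true := by
  induction d with
  | zero =>
    intro a b x y fuel ha hab hit hf
    simp only [iterD] at hit
    obtain ⟨fuel, rfl⟩ : ∃ f, fuel = f + 1 := ⟨fuel - 1, by omega⟩
    simp only [Prod.mk.injEq] at hit
    obtain ⟨rfl, rfl⟩ := hit
    simp [is_fib_loop]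
  | succ d ih =>
    intro a b x y fuel ha hab hit hf
    obtain ⟨fuel, rfl⟩ : ∃ f, fuel = f + 1 := ⟨fuel - 1, by omega⟩
    have hstep : iterD d (b, a + b) = (x, y) := by simpa [iterD] using hit
    have hax : a ≤ x := by
      have h := iterD_fst_ge (d + 1) a b ha hab
      rw [hit] at h
      exact h.1
    have hrec := ih b (a + b) x y fuel (by omega) (by omega) hstep (by omega)
    simp [is_fib_loop, hax]
    exact Or.inr hrec

-- descent: every pair satisfying B's identity is some fibPair
lemma reach (N : Nat) : ∀ x y : Int, y.toNat ≤ N → 1 ≤ x → 1 ≤ y →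
    (y * y - x * y - x * x = 1 ∨ y * y - x * y - x * x = -1) →
    ∃ n, fibPair n = (x, y) := by
  induction N with
  | zero => intro x y hN hx hy _; omega
  | succ N ih =>
    intro x y hN hx hy hd
    by_cases hxy : y ≤ x
    · -- then y*(y-x) ≤ 0 and x*x ≥ 1 force x = y = 1
      have h1 : y * (y - x) ≤ 0 := mul_nonpos_of_nonneg_of_nonpos (by omega) (by omega)
      rcases hd with h | h
      · exfalso; nlinarith [sq_nonneg (x - 1)]
      · have hxle : x ≤ 1 := by nlinarith [sq_nonneg (x - 1)]
        have hx1 : x = 1 := by omega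
        subst hx1
        have hyle : y ≤ 1 := by nlinarith [sq_nonneg (y - 1)]
        have hy1 : y = 1 := by omega
        exact ⟨0, by simp [fibPair, hy1]⟩
    · have hd' : x * x - (y - x) * x - (y - x) * (y - x) = 1 ∨
                 x * x - (y - x) * x - (y - x) * (y - x) = -1 := by
        rcases hd with h | h
        · right; linear_combination -h
        · left; linear_combination -h
      obtain ⟨n, hn⟩ := ih (y - x) x (by omega) (by omega) (by omega) hd'
      refine ⟨n + 1, ?_⟩
      simp only [fibPair, hn, Prod.mk.injEq]
      exact ⟨trivial, by ring⟩

-- forward direction: if the loop returns true from an invariant pair, B's test holds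
lemma loop_sound (fuel : Nat) : ∀ (x y a b : Int), 1 ≤ a → a ≤ b →
    (b * b - a * b - a * a = 1 ∨ b * b - a * b - a * a = -1) →
    is_fib_loop fuel x y a b = true → is_fib_alt x y = true := by
  induction fuel with
  | zero => intro x y a b _ _ _ h; simp [is_fib_loop] at h
  | succ fuel ih =>
    intro x y a b ha hab hd h
    simp only [is_fib_loop] at h
    split_ifs at h with h1 h2
    · obtain ⟨rfl, rfl⟩ := h2
      simp only [is_fib_alt, Bool.and_eq_true, Bool.or_eq_true, decide_eq_true_eq]
      exact ⟨⟨ha, by omega⟩, hd⟩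
    · refine ih x y b (a + b) (by omega) (by omega) ?_ h
      rcases hd with h' | h'
      · right; linear_combination -h'
      · left; linear_combination -h'

-- ===== VERDICT (by name: the statement is the Claim_ definition above) =====
theorem is_fib_spec : Claim_equal_is_fib := by
  intro x y _
  unfold Spec_is_fib
  cases hA : is_fib x y with
  | true =>
    unfold is_fib at hA
    exact (loop_sound _ x y 1 1 (le_refl 1) (le_refl 1) (Or.inr (by ring)) hA).symm
  | false =>
    cases hB : is_fib_alt x y with
    | false => rfl
    | true =>
      exfalso
      simp only [is_fib_alt, Bool.and_eq_true, Bool.or_eq_true, decide_eq_true_eq] at hB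
      obtain ⟨⟨hx, hy⟩, hd⟩ := hB
      obtain ⟨n, hn⟩ := reach y.toNat x y (le_refl _) hx hy hd
      have hx' : (n : Int) ≤ x := by
        have := fibPair_fst_grow n
        rw [hn] at this
        exact this
      have hloop := loop_hits n 1 1 x y (x.toNat + 2) (le_refl 1) (le_refl 1)
        (by rw [iterD_fibPair]; exact hn) (by omega)
      unfold is_fib at hA
      rw [hA] at hloop
      exact Bool.false_ne_true hloop
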